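-- pv_equiv track=rewrite | github.com/jayfmil/miller_ecog_tools | Projects/FR6/FR6_analyses.py | get_elec_region
-- ===== SOURCE A (Python) =====
-- def get_elec_region(elec_str, stim_tag, subj):
--     stim_info = {}
--     stim_info['R1170J'] = {}
--     stim_info['R1170J']['L7ST7-L7ST8'] = 'IPC'
--     stim_info['R1223E'] = {}
--     stim_info['R1223E']['7LD7-7LD9'] = 'TC'
--     if subj in stim_info:
--         key = stim_info[subj][stim_tag]
--         return key
--
--     # hipp_tags = ['Left CA1', 'Left CA2', 'Left CA3', 'Left DG', 'Left Sub', 'Right CA1', 'Right CA2',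
--     #                  'Right CA3', 'Right DG', 'Right Sub']
--     mtl_tags = ['Left PRC', 'Right PRC', 'Right EC', 'Right PHC', 'Left EC', 'Left PHC', 'Left CA1', 'Left CA2',
--                 'Left CA3', 'Left DG', 'Left Sub', 'Right CA1', 'Right CA2', 'Right CA3', 'Right DG', 'Right Sub',
--                 'Left MTL WM', 'Right MTL WM', 'Left PRC', 'Right PRC']
--     #     mtl_tags = ['Left PRC', 'Right PRC', 'Right EC', 'Right PHC', 'Left EC', 'Left PHC']
--     ifg_tags = ['parsopercularis', 'parsorbitalis', 'parstriangularis']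
--     mfg_tags = ['caudalmiddlefrontal', 'rostralmiddlefrontal']
--     sfg_tags = ['superiorfrontal']
--     fc_tags = ['parsopercularis', 'parsorbitalis', 'parstriangularis', 'caudalmiddlefrontal', 'rostralmiddlefrontal',
--                'superiorfrontal', 'Left DLPFC', 'Right DLPFC', 'Left Caudal Middle Frontal Cor',
--                'Right Caudal Middle Frontal Cor',
--                'Right Superior Frontal Gyrus', 'Left Superior Frontal Gyrus']
--     tc_tags = ['superiortemporal', 'middletemporal', 'inferiortemporal', 'Left TC', 'Right TC',
--                'Left Middle Temporal Gyrus', 'Right Middle Temporal Gyrus', 'Left STG', 'Right STG']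
--     ipc_tags = ['inferiorparietal', 'supramarginal', 'Right Supramarginal Gyrus', 'Left Supramarginal Gyrus']
--     spc_tags = ['superiorparietal', 'precuneus']
--     oc_tags = ['lateraloccipital', 'lingual', 'cuneus', 'pericalcarine']
--
--     loc_dict = {'MTL-Hipp': mtl_tags,
--                 'FC': fc_tags,
--                 'TC': tc_tags,
--                 'IPC': ipc_tags,
--                 'SPC': spc_tags,
--                 'OC': oc_tags}
--
--     for key in loc_dict.keys():
--         if elec_str in loc_dict[key]:
--             return key
--     return ''
-- ===== SOURCE B (Python) =====
-- def get_elec_region(elec_str, stim_tag, subj):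
--     stim_info = {'R1170J': {'L7ST7-L7ST8': 'IPC'},
--                  'R1223E': {'7LD7-7LD9': 'TC'}}
--     if subj in stim_info:
--         return stim_info[subj][stim_tag]
--
--     # All region tags flattened in the original group order; LABELS/OFFSETS give
--     # the label of each contiguous block (cumulative end indices).
--     LABELS = ['MTL-Hipp', 'FC', 'TC', 'IPC', 'SPC', 'OC']
--     OFFSETS = [20, 32, 41, 45, 47, 51]
--     FLAT = ['Left PRC', 'Right PRC', 'Right EC', 'Right PHC', 'Left EC', 'Left PHC', 'Left CA1',
--             'Left CA2', 'Left CA3', 'Left DG', 'Left Sub', 'Right CA1', 'Right CA2', 'Right CA3',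
--             'Right DG', 'Right Sub', 'Left MTL WM', 'Right MTL WM', 'Left PRC', 'Right PRC',
--             'parsopercularis', 'parsorbitalis', 'parstriangularis', 'caudalmiddlefrontal',
--             'rostralmiddlefrontal', 'superiorfrontal', 'Left DLPFC', 'Right DLPFC',
--             'Left Caudal Middle Frontal Cor', 'Right Caudal Middle Frontal Cor',
--             'Right Superior Frontal Gyrus', 'Left Superior Frontal Gyrus',
--             'superiortemporal', 'middletemporal', 'inferiortemporal', 'Left TC', 'Right TC',
--             'Left Middle Temporal Gyrus', 'Right Middle Temporal Gyrus', 'Left STG', 'Right STG',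
--             'inferiorparietal', 'supramarginal', 'Right Supramarginal Gyrus', 'Left Supramarginal Gyrus',
--             'superiorparietal', 'precuneus',
--             'lateraloccipital', 'lingual', 'cuneus', 'pericalcarine']
--
--     try:
--         i = FLAT.index(elec_str)
--     except ValueError:
--         return ''
--     # binary search: smallest j with i < OFFSETS[j]
--     lo, hi = 0, len(OFFSETS)
--     while lo < hi:
--         mid = (lo + hi) // 2
--         if i < OFFSETS[mid]:
--             hi = mid
--         else:
--             lo = mid + 1
--     return LABELS[lo]
-- ===== Notes on version B (the rewrite author's own statement) =====
-- stated objective: alternative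
-- what changed: Replaced the per-group membership scan with a flat tag array plus cumulative block offsets: one list.index to find the tag's position, then a binary search over the offsets to map the position to its region label; the stim_info special case is kept.
-- outside the precondition, e.g. on get_elec_region('Left PRC', 'x', 'R1170J'): A raises KeyError, B raises KeyError
import Mathlib
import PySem

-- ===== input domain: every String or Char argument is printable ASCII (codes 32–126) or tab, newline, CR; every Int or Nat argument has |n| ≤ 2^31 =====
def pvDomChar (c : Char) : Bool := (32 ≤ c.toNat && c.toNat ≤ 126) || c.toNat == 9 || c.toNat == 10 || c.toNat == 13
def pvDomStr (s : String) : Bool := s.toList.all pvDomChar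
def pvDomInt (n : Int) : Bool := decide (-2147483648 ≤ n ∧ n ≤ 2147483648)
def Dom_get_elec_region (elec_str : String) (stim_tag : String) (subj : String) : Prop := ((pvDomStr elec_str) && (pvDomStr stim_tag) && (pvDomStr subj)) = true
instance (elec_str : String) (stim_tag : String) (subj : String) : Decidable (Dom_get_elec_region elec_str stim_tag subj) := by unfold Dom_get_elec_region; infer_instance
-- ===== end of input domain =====

-- B replaces A's per-group membership scan by a flat tag array with cumulative block offsets:
-- one list.index finds the tag's position, a binary search over the offsets maps it to its
-- label (objective: alternative; same behaviour incl. the stim_info KeyError, excluded by Pre_).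

-- ===== PORT A =====
-- the stim_info special-case dict, shared text of both Pythons
def pvStimInfo : PySem.Dict String (PySem.Dict String String) :=
  ((PySem.Dict.empty.insert "R1170J" (PySem.Dict.empty.insert "L7ST7-L7ST8" "IPC")).insert
    "R1223E" (PySem.Dict.empty.insert "7LD7-7LD9" "TC"))

-- A's loop: for key in loc_dict: if elec_str in loc_dict[key]: return key   (insertion order)
def pvScanA (e : String) : List (String × List String) → String
  | [] => ""
  | (k, tags) :: rest => if e ∈ tags then k else pvScanA e rest

def get_elec_region (elec_str : String) (stim_tag : String) (subj : String) : String :=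
  if pvStimInfo.contains subj then
    -- stim_info[subj][stim_tag]; missing stim_tag is a KeyError, excluded by Pre_ (getD "" stands in for none)
    ((pvStimInfo.getD subj PySem.Dict.empty).get? stim_tag).getD ""
  else
    let mtl_tags := ["Left PRC", "Right PRC", "Right EC", "Right PHC", "Left EC", "Left PHC", "Left CA1", "Left CA2", "Left CA3", "Left DG", "Left Sub", "Right CA1", "Right CA2", "Right CA3", "Right DG", "Right Sub", "Left MTL WM", "Right MTL WM", "Left PRC", "Right PRC"]
    let fc_tags := ["parsopercularis", "parsorbitalis", "parstriangularis", "caudalmiddlefrontal", "rostralmiddlefrontal", "superiorfrontal", "Left DLPFC", "Right DLPFC", "Left Caudal Middle Frontal Cor", "Right Caudal Middle Frontal Cor", "Right Superior Frontal Gyrus", "Left Superior Frontal Gyrus"]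
    let tc_tags := ["superiortemporal", "middletemporal", "inferiortemporal", "Left TC", "Right TC", "Left Middle Temporal Gyrus", "Right Middle Temporal Gyrus", "Left STG", "Right STG"]
    let ipc_tags := ["inferiorparietal", "supramarginal", "Right Supramarginal Gyrus", "Left Supramarginal Gyrus"]
    let spc_tags := ["superiorparietal", "precuneus"]
    let oc_tags := ["lateraloccipital", "lingual", "cuneus", "pericalcarine"]
    let loc_dict := [("MTL-Hipp", mtl_tags), ("FC", fc_tags), ("TC", tc_tags), ("IPC", ipc_tags), ("SPC", spc_tags), ("OC", oc_tags)]
    pvScanA elec_str loc_dict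

-- ===== PORT B =====
def pvLabelsB : List String := ["MTL-Hipp", "FC", "TC", "IPC", "SPC", "OC"]
def pvOffsetsB : List Nat := [20, 32, 41, 45, 47, 51]
def pvFlatB : List String :=
  ["Left PRC", "Right PRC", "Right EC", "Right PHC", "Left EC", "Left PHC", "Left CA1",
   "Left CA2", "Left CA3", "Left DG", "Left Sub", "Right CA1", "Right CA2", "Right CA3",
   "Right DG", "Right Sub", "Left MTL WM", "Right MTL WM", "Left PRC", "Right PRC",
   "parsopercularis", "parsorbitalis", "parstriangularis", "caudalmiddlefrontal",
   "rostralmiddlefrontal", "superiorfrontal", "Left DLPFC", "Right DLPFC",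
   "Left Caudal Middle Frontal Cor", "Right Caudal Middle Frontal Cor",
   "Right Superior Frontal Gyrus", "Left Superior Frontal Gyrus",
   "superiortemporal", "middletemporal", "inferiortemporal", "Left TC", "Right TC",
   "Left Middle Temporal Gyrus", "Right Middle Temporal Gyrus", "Left STG", "Right STG",
   "inferiorparietal", "supramarginal", "Right Supramarginal Gyrus", "Left Supramarginal Gyrus",
   "superiorparietal", "precuneus",
   "lateraloccipital", "lingual", "cuneus", "pericalcarine"]

-- the while loop: smallest j in [lo,hi) with i < OFFSETS[j] (lo,hi stay in range, so getD is exact)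
-- fuel = hi - lo bounds the iteration count of the Python while loop (hi - lo shrinks each step)
def pvBisectGo (fuel : Nat) (i lo hi : Nat) : Nat :=
  match fuel with
  | 0 => lo
  | fuel + 1 =>
    if lo < hi then
      let mid := (lo + hi) / 2
      if i < pvOffsetsB.getD mid 0 then pvBisectGo fuel i lo mid else pvBisectGo fuel i (mid + 1) hi
    else lo

def pvBisectB (i : Nat) (lo hi : Nat) : Nat := pvBisectGo (hi - lo) i lo hi

def get_elec_region_alt (elec_str : String) (stim_tag : String) (subj : String) : String :=
  if pvStimInfo.contains subj then
    ((pvStimInfo.getD subj PySem.Dict.empty).get? stim_tag).getD ""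
  else
    match PySem.List.index? pvFlatB elec_str with
    | none => ""                                  -- FLAT.index raised ValueError
    | some i => pvLabelsB.getD (pvBisectB i 0 6) ""

-- ===== PRECONDITION & SPEC =====
-- Pre_ excludes the inputs where both Pythons raise KeyError: subj is one of the two special
-- subjects but stim_tag is not that subject's stim tag.
def Pre_get_elec_region (elec_str : String) (stim_tag : String) (subj : String) : Prop :=
  (subj = "R1170J" → stim_tag = "L7ST7-L7ST8") ∧ (subj = "R1223E" → stim_tag = "7LD7-7LD9")
instance (elec_str : String) (stim_tag : String) (subj : String) : Decidable (Pre_get_elec_region elec_str stim_tag subj) := by unfold Pre_get_elec_region; infer_instance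

def pvWitness_get_elec_region : String × String × String := ("Left PRC", "x", "R1000X")

def Spec_get_elec_region (elec_str : String) (stim_tag : String) (subj : String) (out : String) : Prop := out = get_elec_region_alt elec_str stim_tag subj
instance (elec_str : String) (stim_tag : String) (subj : String) (out : String) : Decidable (Spec_get_elec_region elec_str stim_tag subj out) := by unfold Spec_get_elec_region; infer_instance

-- ===== CLAIM (what is proved, stated in full; the proofs are below) =====
def Claim_equal_get_elec_region : Prop := ∀ (elec_str : String) (stim_tag : String) (subj : String), Dom_get_elec_region elec_str stim_tag subj → Pre_get_elec_region elec_str stim_tag subj → Spec_get_elec_region elec_str stim_tag subj (get_elec_region elec_str stim_tag subj)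

-- ===== LEMMAS AND PROOFS =====
def pvLocList : List (String × List String) := [("MTL-Hipp", ["Left PRC", "Right PRC", "Right EC", "Right PHC", "Left EC", "Left PHC", "Left CA1", "Left CA2", "Left CA3", "Left DG", "Left Sub", "Right CA1", "Right CA2", "Right CA3", "Right DG", "Right Sub", "Left MTL WM", "Right MTL WM", "Left PRC", "Right PRC"]), ("FC", ["parsopercularis", "parsorbitalis", "parstriangularis", "caudalmiddlefrontal", "rostralmiddlefrontal", "superiorfrontal", "Left DLPFC", "Right DLPFC", "Left Caudal Middle Frontal Cor", "Right Caudal Middle Frontal Cor", "Right Superior Frontal Gyrus", "Left Superior Frontal Gyrus"]), ("TC", ["superiortemporal", "middletemporal", "inferiortemporal", "Left TC", "Right TC", "Left Middle Temporal Gyrus", "Right Middle Temporal Gyrus", "Left STG", "Right STG"]), ("IPC", ["inferiorparietal", "supramarginal", "Right Supramarginal Gyrus", "Left Supramarginal Gyrus"]), ("SPC", ["superiorparietal", "precuneus"]), ("OC", ["lateraloccipital", "lingual", "cuneus", "pericalcarine"])]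

def pvClassifyB (e : String) : String :=
  match PySem.List.index? pvFlatB e with
  | none => ""
  | some i => pvLabelsB.getD (pvBisectB i 0 6) ""

set_option maxRecDepth 16384 in
set_option maxHeartbeats 1000000 in
lemma classify_eq (e : String) :
    pvScanA e pvLocList = pvClassifyB e := by
  by_cases h : e ∈ pvFlatB
  · simp only [pvFlatB, List.mem_cons, List.not_mem_nil, or_false] at h
    rcases h with rfl|rfl|rfl|rfl|rfl|rfl|rfl|rfl|rfl|rfl|rfl|rfl|rfl|rfl|rfl|rfl|rfl|rfl|rfl|rfl|rfl|rfl|rfl|rfl|rfl|rfl|rfl|rfl|rfl|rfl|rfl|rfl|rfl|rfl|rfl|rfl|rfl|rfl|rfl|rfl|rfl|rfl|rfl|rfl|rfl|rfl|rfl|rfl|rfl|rfl|rfl <;> decide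
  · have hb : pvClassifyB e = "" := by
      unfold pvClassifyB
      rw [((PySem.List.index?_eq_none_iff _ _).mpr h)]
    rw [hb]
    simp only [pvFlatB, List.mem_cons, List.not_mem_nil, or_false, not_or] at h
    obtain ⟨h1, h2, h3, h4, h5, h6, h7, h8, h9, h10, h11, h12, h13, h14, h15, h16, h17, h18, -, -, h19, h20, h21, h22, h23, h24, h25, h26, h27, h28, h29, h30, h31, h32, h33, h34, h35, h36, h37, h38, h39, h40, h41, h42, h43, h44, h45, h46, h47, h48, h49⟩ := h
    simp [pvScanA, pvLocList, h1, h2, h3, h4, h5, h6, h7, h8, h9, h10, h11, h12, h13, h14, h15, h16, h17, h18, h19, h20, h21, h22, h23, h24, h25, h26, h27, h28, h29, h30, h31, h32, h33, h34, h35, h36, h37, h38, h39, h40, h41, h42, h43, h44, h45, h46, h47, h48, h49]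

-- ===== VERDICT (by name: the statement is the Claim_ definition above) =====
theorem get_elec_region_spec : Claim_equal_get_elec_region := by
  intro elec_str stim_tag subj _ _
  unfold Spec_get_elec_region get_elec_region get_elec_region_alt
  split_ifs
  · rfl
  · exact classify_eq elec_str
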